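-- pv_equiv track=rewrite | github.com/Ganesh-11062000/Data_Structures | Competitive_programming/contests/April long/covid_queue.py | go
-- ===== SOURCE A (Python) =====
-- def go(seq):
--     prev_loc = -1
--     for i in range(0,len(seq)):
--         if seq[i] == 1:
--             if prev_loc >=0:
--                 if i - prev_loc < 6:
--                     return "NO"
--                 else:
--                     prev_loc = i
--             else: prev_loc = i
--     return "YES"
-- ===== SOURCE B (Python) =====
-- def go(seq):
--     # A 1 violates the rule exactly when another 1 occurs in the window of
--     # the 5 following elements; check each position's bounded window.
--     return "NO" if any(x == 1 and 1 in seq[i + 1:i + 6] for i, x in enumerate(seq)) else "YES"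
-- ===== Notes on version B (the rewrite author's own statement) =====
-- stated objective: simpler
-- what changed: Replaces A's stateful scan carrying prev_loc (the index of the last seen 1) with a stateless bounded-window test: a sequence fails iff some 1 has another 1 within the next 5 elements, checked per position via slice membership.
import Mathlib
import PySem

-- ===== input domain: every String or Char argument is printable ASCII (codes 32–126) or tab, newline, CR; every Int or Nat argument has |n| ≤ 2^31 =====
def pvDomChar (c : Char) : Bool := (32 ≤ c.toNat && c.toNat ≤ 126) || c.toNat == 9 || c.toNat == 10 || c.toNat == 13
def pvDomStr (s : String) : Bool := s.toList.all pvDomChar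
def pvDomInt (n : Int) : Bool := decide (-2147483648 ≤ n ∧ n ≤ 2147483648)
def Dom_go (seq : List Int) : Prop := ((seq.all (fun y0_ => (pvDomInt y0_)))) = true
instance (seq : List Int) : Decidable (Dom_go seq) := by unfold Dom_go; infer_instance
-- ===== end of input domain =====

-- B replaces A's stateful prev_loc scan by a stateless bounded-window test
-- (a 1 with another 1 among the next 5 elements); objective: simpler.

-- ===== PORT A =====
-- loop 'for i in range(0, len(seq))' with state prev_loc and early return "NO";
-- seq[i] is always in range here, so getD is exact.
def goAux (seq : List Int) (i : Nat) (prev : Int) : String :=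
  if i < seq.length then
    if seq.getD i 0 = 1 then
      if prev ≥ 0 then
        if (i : Int) - prev < 6 then "NO"
        else goAux seq (i + 1) (i : Int)
      else goAux seq (i + 1) (i : Int)
    else goAux seq (i + 1) prev
  else "YES"
termination_by seq.length - i

def go (seq : List Int) : String := goAux seq 0 (-1)

-- ===== PORT B =====
-- "NO" if any(x == 1 and 1 in seq[i+1:i+6] for i, x in enumerate(seq)) else "YES"
def go_alt (seq : List Int) : String :=
  if (PySem.List.enumerate seq 0).any
      (fun p => p.2 == 1 && (PySem.List.slice seq (some (p.1 + 1)) (some (p.1 + 6))).contains 1)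
  then "NO" else "YES"

-- ===== PRECONDITION & SPEC =====
def Spec_go (seq : List Int) (out : String) : Prop := out = go_alt seq
instance (seq : List Int) (out : String) : Decidable (Spec_go seq out) := by unfold Spec_go; infer_instance

-- ===== CLAIM (what is proved, stated in full; the proofs are below) =====
def Claim_equal_go : Prop := ∀ (seq : List Int), Dom_go seq → Spec_go seq (go seq)

-- ===== LEMMAS AND PROOFS =====

-- the condition under which either program answers "NO", parameterised by A's loop state
def NoCond (seq : List Int) (i : Nat) (prev : Int) : Prop :=
  (∃ p q : Nat, i ≤ p ∧ p < q ∧ q < seq.length ∧ q < p + 6 ∧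
      seq.getD p 0 = 1 ∧ seq.getD q 0 = 1)
  ∨ (0 ≤ prev ∧ ∃ q : Nat, i ≤ q ∧ q < seq.length ∧ seq.getD q 0 = 1 ∧ (q : Int) < prev + 6)

lemma goAux_yes_or_no (seq : List Int) (i : Nat) (prev : Int) :
    goAux seq i prev = "NO" ∨ goAux seq i prev = "YES" := by
  induction i, prev using goAux.induct seq with
  | case1 i prev h1 h2 h3 h4 =>
      rw [goAux, if_pos h1, if_pos h2, if_pos h3, if_pos h4]; exact Or.inl rfl
  | case2 i prev h1 h2 h3 h4 ih =>
      rw [goAux, if_pos h1, if_pos h2, if_pos h3, if_neg h4]; exact ih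
  | case3 i prev h1 h2 h3 ih =>
      rw [goAux, if_pos h1, if_pos h2, if_neg h3]; exact ih
  | case4 i prev h1 h2 ih =>
      rw [goAux, if_pos h1, if_neg h2]; exact ih
  | case5 i prev h1 =>
      rw [goAux, if_neg h1]; exact Or.inr rfl

lemma goAux_no_iff (seq : List Int) (i : Nat) (prev : Int) :
    goAux seq i prev = "NO" ↔ NoCond seq i prev := by
  induction i, prev using goAux.induct seq with
  | case1 i prev h1 h2 h3 h4 =>
      rw [goAux, if_pos h1, if_pos h2, if_pos h3, if_pos h4]
      constructor
      · intro _
        exact Or.inr ⟨h3, i, le_refl i, h1, h2, by omega⟩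
      · intro _; rfl
  | case2 i prev h1 h2 h3 h4 ih =>
      rw [goAux, if_pos h1, if_pos h2, if_pos h3, if_neg h4, ih]
      constructor
      · rintro (⟨p, q, hp, hpq, hq, hw, e1, e2⟩ | ⟨_, q, hqi, hq, e, hlt⟩)
        · exact Or.inl ⟨p, q, by omega, hpq, hq, hw, e1, e2⟩
        · exact Or.inl ⟨i, q, le_refl i, by omega, hq, by omega, h2, e⟩
      · rintro (⟨p, q, hp, hpq, hq, hw, e1, e2⟩ | ⟨_, q, hqi, hq, e, hlt⟩)
        · rcases Nat.eq_or_lt_of_le hp with rfl | hp'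
          · exact Or.inr ⟨by positivity, q, by omega, hq, e2, by omega⟩
          · exact Or.inl ⟨p, q, hp', hpq, hq, hw, e1, e2⟩
        · exfalso; omega
  | case3 i prev h1 h2 h3 ih =>
      rw [goAux, if_pos h1, if_pos h2, if_neg h3, ih]
      constructor
      · rintro (⟨p, q, hp, hpq, hq, hw, e1, e2⟩ | ⟨_, q, hqi, hq, e, hlt⟩)
        · exact Or.inl ⟨p, q, by omega, hpq, hq, hw, e1, e2⟩
        · exact Or.inl ⟨i, q, le_refl i, by omega, hq, by omega, h2, e⟩
      · rintro (⟨p, q, hp, hpq, hq, hw, e1, e2⟩ | ⟨hp0, _⟩)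
        · rcases Nat.eq_or_lt_of_le hp with rfl | hp'
          · exact Or.inr ⟨by positivity, q, by omega, hq, e2, by omega⟩
          · exact Or.inl ⟨p, q, hp', hpq, hq, hw, e1, e2⟩
        · exact absurd hp0 h3
  | case4 i prev h1 h2 ih =>
      rw [goAux, if_pos h1, if_neg h2, ih]
      constructor
      · rintro (⟨p, q, hp, hpq, hq, hw, e1, e2⟩ | ⟨hp0, q, hqi, hq, e, hlt⟩)
        · exact Or.inl ⟨p, q, by omega, hpq, hq, hw, e1, e2⟩
        · exact Or.inr ⟨hp0, q, by omega, hq, e, hlt⟩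
      · rintro (⟨p, q, hp, hpq, hq, hw, e1, e2⟩ | ⟨hp0, q, hqi, hq, e, hlt⟩)
        · have hpi : i ≠ p := by rintro rfl; exact h2 e1
          exact Or.inl ⟨p, q, by omega, hpq, hq, hw, e1, e2⟩
        · have hqi' : i ≠ q := by rintro rfl; exact h2 e
          exact Or.inr ⟨hp0, q, by omega, hq, e, hlt⟩
  | case5 i prev h1 =>
      rw [goAux, if_neg h1]
      constructor
      · intro h; exact absurd h (by decide)
      · rintro (⟨p, q, hp, hpq, hq, _⟩ | ⟨_, q, hqi, hq, _⟩) <;> omega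

-- B's window: 1 ∈ seq[p+1:p+6] characterised by an absolute index
lemma window_mem (seq : List Int) (p : Nat) :
    (1 : Int) ∈ (seq.drop (p + 1)).take 5 ↔
      ∃ q : Nat, p < q ∧ q < seq.length ∧ q < p + 6 ∧ seq.getD q 0 = 1 := by
  rw [List.mem_iff_getElem]
  constructor
  · rintro ⟨j, hj, hji⟩
    have hlen : j < 5 ∧ p + 1 + j < seq.length := by
      simp [List.length_take, List.length_drop] at hj; omega
    refine ⟨p + 1 + j, by omega, hlen.2, by omega, ?_⟩
    rw [List.getD_eq_getElem seq 0 hlen.2]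
    simpa using hji
  · rintro ⟨q, hpq, hq, hw, e⟩
    have hjlen : q - (p + 1) < ((seq.drop (p + 1)).take 5).length := by
      simp [List.length_take, List.length_drop]; omega
    refine ⟨q - (p + 1), hjlen, ?_⟩
    rw [List.getElem_take, List.getElem_drop]
    have hidx : p + 1 + (q - (p + 1)) = q := by omega
    simp only [hidx]
    rw [← List.getD_eq_getElem seq 0 hq]; exact e

lemma go_alt_no_iff (seq : List Int) :
    go_alt seq = "NO" ↔ NoCond seq 0 (-1) := by
  unfold go_alt
  constructor
  · intro h
    have hany : (PySem.List.enumerate seq 0).any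
        (fun p => p.2 == 1 && (PySem.List.slice seq (some (p.1 + 1)) (some (p.1 + 6))).contains 1) = true := by
      by_contra hn
      rw [if_neg (by simpa using hn)] at h
      exact absurd h (by decide)
    rw [List.any_eq_true] at hany
    obtain ⟨pr, hmem, hf⟩ := hany
    rw [PySem.List.mem_enumerate_iff] at hmem
    obtain ⟨k, hk, rfl⟩ := hmem
    simp only [Bool.and_eq_true, beq_iff_eq, List.contains_eq_mem, decide_eq_true_eq] at hf
    obtain ⟨e1, hin⟩ := hf
    have hcast : (0 : Int) + (k : Int) + 1 = ((k + 1 : Nat) : Int) ∧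
        (0 : Int) + (k : Int) + 6 = ((k + 6 : Nat) : Int) := by omega
    rw [hcast.1, hcast.2, PySem.List.slice_natCast] at hin
    have : (k + 6) - (k + 1) = 5 := by omega
    rw [this] at hin
    rw [window_mem] at hin
    obtain ⟨q, hkq, hq, hw, e2⟩ := hin
    exact Or.inl ⟨k, q, Nat.zero_le k, hkq, hq, hw,
      by rw [List.getD_eq_getElem seq 0 hk]; exact e1, e2⟩
  · rintro (⟨p, q, _, hpq, hq, hw, e1, e2⟩ | ⟨h0, _⟩)
    · have hp : p < seq.length := by omega
      have hany : (PySem.List.enumerate seq 0).any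
          (fun r => r.2 == 1 && (PySem.List.slice seq (some (r.1 + 1)) (some (r.1 + 6))).contains 1) = true := by
        rw [List.any_eq_true]
        refine ⟨((0 : Int) + p, seq[p]), (PySem.List.mem_enumerate_iff _ _ _).2 ⟨p, hp, rfl⟩, ?_⟩
        simp only [Bool.and_eq_true, beq_iff_eq, List.contains_eq_mem, decide_eq_true_eq]
        refine ⟨by rw [← List.getD_eq_getElem seq 0 hp]; exact e1, ?_⟩
        have hcast : (0 : Int) + (p : Int) + 1 = ((p + 1 : Nat) : Int) ∧
            (0 : Int) + (p : Int) + 6 = ((p + 6 : Nat) : Int) := by omega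
        rw [hcast.1, hcast.2, PySem.List.slice_natCast]
        have : (p + 6) - (p + 1) = 5 := by omega
        rw [this, window_mem]
        exact ⟨q, hpq, hq, hw, e2⟩
      rw [if_pos hany]
    · exfalso; omega

-- ===== VERDICT (by name: the statement is the Claim_ definition above) =====
theorem go_spec : Claim_equal_go := by
  intro seq _
  unfold Spec_go go
  by_cases h : goAux seq 0 (-1) = "NO"
  · rw [h, Eq.comm, go_alt_no_iff]
    exact (goAux_no_iff seq 0 (-1)).1 h
  · have hy : goAux seq 0 (-1) = "YES" := (goAux_yes_or_no seq 0 (-1)).resolve_left h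
    rw [hy]
    have hnc : ¬ NoCond seq 0 (-1) := fun hc => h ((goAux_no_iff seq 0 (-1)).2 hc)
    have : go_alt seq ≠ "NO" := fun hn => hnc ((go_alt_no_iff seq).1 hn)
    unfold go_alt at this ⊢
    by_cases hb : (PySem.List.enumerate seq 0).any
        (fun p => p.2 == 1 && (PySem.List.slice seq (some (p.1 + 1)) (some (p.1 + 6))).contains 1) = true
    · exact absurd (by rw [if_pos hb]) this
    · rw [if_neg hb]
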